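-- pv_equiv track=rewrite | github.com/Amfales/adventofcode2021 | prob20/picture.py | windowed_box
-- ===== SOURCE A (Python) =====
-- def windowed_box(grid: list[list[str]], fill_char:str):
--   len1 = len(grid)
--   len2 = len(grid[0])
--   def lookup(a,b):
--     if a < 0 or a >= len1:
--       return fill_char
--     if b < 0 or b >= len2:
--       return fill_char
--     return grid[a][b]
--
--   for y in range(-2, len1):
--     for x in range(-2, len2):
--       l = []
--       for w in range(3):
--         l.append([])
--         for z in range(3):
--           l[-1].append(lookup(y+w, x+z))
--       yield l
-- ===== SOURCE B (Python) =====
-- def windowed_box(grid, fill_char):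
--   len1 = len(grid)
--   len2 = len(grid[0])
--   pad_row = [fill_char] * (len2 + 4)
--   padded = [pad_row, pad_row] \
--       + [[fill_char, fill_char] + row[:len2] + [fill_char, fill_char] for row in grid] \
--       + [pad_row, pad_row]
--   for i in range(len1 + 2):
--     for j in range(len2 + 2):
--       yield [padded[i + w][j:j + 3] for w in range(3)]
-- ===== Notes on version B (the rewrite author's own statement) =====
-- stated objective: alternative
-- what changed: Replaces the per-cell bounds-checked lookup helper inside a triple nested loop by materializing a padded (len1+4)x(len2+4) grid once and yielding each 3x3 window as direct row slices padded[i+w][j:j+3].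
import Mathlib
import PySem

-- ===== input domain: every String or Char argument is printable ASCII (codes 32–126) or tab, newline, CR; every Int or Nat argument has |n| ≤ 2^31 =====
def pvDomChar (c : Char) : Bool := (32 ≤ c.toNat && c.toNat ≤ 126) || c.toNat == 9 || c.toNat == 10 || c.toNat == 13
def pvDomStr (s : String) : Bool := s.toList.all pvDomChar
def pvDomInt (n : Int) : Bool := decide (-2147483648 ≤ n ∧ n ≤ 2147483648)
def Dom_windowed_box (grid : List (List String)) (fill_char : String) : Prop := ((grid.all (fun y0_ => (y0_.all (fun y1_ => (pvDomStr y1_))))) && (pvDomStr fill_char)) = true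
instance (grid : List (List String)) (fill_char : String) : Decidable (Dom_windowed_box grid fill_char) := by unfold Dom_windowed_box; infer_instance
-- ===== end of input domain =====

-- B replaces A's per-cell bounds-checked lookup (triple nested loop) by one padded grid built
-- up front, each window being three direct row slices; equivalence of the yielded sequences
-- (A is a generator; both ports return the list of yielded windows).

-- ===== PORT A =====
-- A's nested `def lookup(a, b)` helper
def pvLookup (grid : List (List String)) (fill_char : String) (len1 len2 a b : Int) : String :=
  if a < 0 ∨ len1 ≤ a then fill_char
  else if b < 0 ∨ len2 ≤ b then fill_char
  else PySem.List.pyGetD (PySem.List.pyGetD grid a []) b ""   -- grid[a][b]; in range under Pre_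

def windowed_box (grid : List (List String)) (fill_char : String) : List (List (List String)) :=
  let len1 : Int := grid.length
  let len2 : Int := (PySem.List.pyGetD grid 0 []).length   -- len(grid[0]); empty grid raises, excluded by Pre_
  (PySem.List.pyRange (-2) len1 1).foldl (fun acc y =>
    (PySem.List.pyRange (-2) len2 1).foldl (fun acc2 x =>
      acc2 ++ [(PySem.List.pyRange 0 3 1).foldl (fun l w =>
        l ++ [(PySem.List.pyRange 0 3 1).foldl (fun r z =>
          r ++ [pvLookup grid fill_char len1 len2 (y + w) (x + z)]) []]) []]) acc) []

-- ===== PORT B =====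
-- B's pad_row and padded table
def pvPadRow (fill_char : String) (len2 : Nat) : List String := List.replicate (len2 + 4) fill_char

def pvPadded (grid : List (List String)) (fill_char : String) (len2 : Nat) : List (List String) :=
  [pvPadRow fill_char len2, pvPadRow fill_char len2]
    ++ grid.map (fun row => [fill_char, fill_char] ++ row.take len2 ++ [fill_char, fill_char])
    ++ [pvPadRow fill_char len2, pvPadRow fill_char len2]

def windowed_box_alt (grid : List (List String)) (fill_char : String) : List (List (List String)) :=
  let len1 : Nat := grid.length
  let len2 : Nat := (PySem.List.pyGetD grid 0 []).length
  let padded := pvPadded grid fill_char len2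
  (List.range (len1 + 2)).flatMap (fun i =>
    (List.range (len2 + 2)).map (fun j =>
      (List.range 3).map (fun w => ((padded.getD (i + w) []).drop j).take 3)))

-- ===== PRECONDITION & SPEC =====
-- Pre_ excludes exactly the inputs on which A raises an IndexError: the empty grid
-- (grid[0]) and ragged grids with some row shorter than the first row (grid[a][b]).
def Pre_windowed_box (grid : List (List String)) (fill_char : String) : Prop :=
  grid ≠ [] ∧ ∀ row ∈ grid, (grid.headD []).length ≤ row.length

instance (grid : List (List String)) (fill_char : String) : Decidable (Pre_windowed_box grid fill_char) := by unfold Pre_windowed_box; infer_instance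

def pvWitness_windowed_box : List (List String) × String := ([["a", "b"], ["c", "d"]], "#")

def Spec_windowed_box (grid : List (List String)) (fill_char : String) (out : List (List (List String))) : Prop := out = windowed_box_alt grid fill_char
instance (grid : List (List String)) (fill_char : String) (out : List (List (List String))) : Decidable (Spec_windowed_box grid fill_char out) := by unfold Spec_windowed_box; infer_instance

-- ===== CLAIM (what is proved, stated in full; the proofs are below) =====
def Claim_equal_windowed_box : Prop := ∀ (grid : List (List String)) (fill_char : String), Dom_windowed_box grid fill_char → Pre_windowed_box grid fill_char → Spec_windowed_box grid fill_char (windowed_box grid fill_char)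

-- ===== LEMMAS AND PROOFS =====

-- nested append-folds are a flatMap
theorem pv_foldl_flatMap {α β γ : Type} (l : List α) (m : List β) (g : α → β → γ) (init : List γ) :
    l.foldl (fun acc y => m.foldl (fun acc2 x => acc2 ++ [g y x]) acc) init
      = init ++ l.flatMap (fun y => m.map (g y)) := by
  induction l generalizing init with
  | nil => simp
  | cons a l ih =>
      simp only [List.foldl_cons, List.flatMap_cons,
        PySem.List.foldl_append_singleton_eq_map]
      simp [List.flatMap]

-- take 3 of a drop, elementwise
theorem pv_take3_drop {γ : Type} (d : γ) (l : List γ) (j : Nat) (h : j + 3 ≤ l.length) :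
    (l.drop j).take 3 = [l.getD j d, l.getD (j+1) d, l.getD (j+2) d] := by
  induction j generalizing l with
  | zero =>
      match l, h with
      | a :: b :: c :: rest, _ => simp [List.getD]
  | succ j ih =>
      match l, h with
      | a :: rest, h =>
          simp only [List.drop_succ_cons]
          rw [ih rest (by simpa using h)]
          simp [List.getD]

theorem pv_padRow_getD (f : String) (n2 b : Nat) (hb : b < n2 + 4) :
    (pvPadRow f n2).getD b "" = f := by
  simp [pvPadRow, List.getD_eq_getElem?_getD, hb]

theorem pv_wrap_getD (f : String) (r : List String) (n2 : Nat) (hlen : n2 ≤ r.length)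
    (b : Nat) (hb : b < n2 + 4) :
    ([f, f] ++ r.take n2 ++ [f, f]).getD b ""
      = if b < 2 ∨ n2 + 2 ≤ b then f else r.getD (b - 2) "" := by
  match b, hb with
  | 0, _ => simp
  | 1, _ => simp
  | (b+2), hb =>
      simp only [List.cons_append, List.nil_append, List.getD_cons_succ]
      by_cases h : b < n2
      · have h2 : ¬ (b + 2 < 2 ∨ n2 + 2 ≤ b + 2) := by omega
        rw [if_neg h2]
        have hb' : b < (r.take n2).length := by simp; omega
        rw [List.getD_append _ _ _ _ hb']
        simp [List.getD_eq_getElem?_getD, h]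
      · have h2 : (b + 2 < 2 ∨ n2 + 2 ≤ b + 2) := by omega
        rw [if_pos h2]
        have hlt : (r.take n2).length ≤ b := by simp; omega
        rw [List.getD_append_right _ _ _ _ hlt]
        have : (r.take n2).length = n2 := by simp; omega
        rw [this]
        match b - n2, (by omega : b - n2 < 2) with
        | 0, _ => simp
        | 1, _ => simp

theorem pv_padded_getD_row (grid : List (List String)) (f : String) (n2 a : Nat)
    (ha : a < grid.length + 4) :
    (pvPadded grid f n2).getD a []
      = if a < 2 ∨ grid.length + 2 ≤ a then pvPadRow f n2
        else [f, f] ++ (grid.getD (a - 2) []).take n2 ++ [f, f] := by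
  match a, ha with
  | 0, _ => simp [pvPadded]
  | 1, _ => simp [pvPadded]
  | (a+2), ha =>
      simp only [pvPadded, List.cons_append, List.nil_append, List.getD_cons_succ]
      by_cases h : a < grid.length
      · have h2 : ¬ (a + 2 < 2 ∨ grid.length + 2 ≤ a + 2) := by omega
        rw [if_neg h2]
        have ha' : a < (grid.map (fun row => f :: f :: (row.take n2 ++ [f, f]))).length := by
          simpa using h
        rw [List.getD_append _ _ _ _ ha']
        simp [List.getD_eq_getElem?_getD, h]
      · have h2 : (a + 2 < 2 ∨ grid.length + 2 ≤ a + 2) := by omega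
        rw [if_pos h2]
        have hlt : (grid.map (fun row => f :: f :: (row.take n2 ++ [f, f]))).length ≤ a := by
          simpa using h
        rw [List.getD_append_right _ _ _ _ hlt]
        have hml : (grid.map (fun row => f :: f :: (row.take n2 ++ [f, f]))).length = grid.length := by simp
        rw [hml]
        match a - grid.length, (by omega : a - grid.length < 2) with
        | 0, _ => simp
        | 1, _ => simp

theorem pv_getD_mem {α : Type} (l : List α) (d : α) (k : Nat) (h : k < l.length) :
    l.getD k d ∈ l := by
  rw [List.getD_eq_getElem _ _ h]
  exact List.getElem_mem h

theorem pv_padded_row_len (grid : List (List String)) (f : String) (n2 a : Nat)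
    (hrows : ∀ row ∈ grid, n2 ≤ row.length) (ha : a < grid.length + 4) :
    ((pvPadded grid f n2).getD a []).length = n2 + 4 := by
  rw [pv_padded_getD_row grid f n2 a ha]
  split
  · simp [pvPadRow]
  · have hmem : grid.getD (a - 2) [] ∈ grid := pv_getD_mem _ _ _ (by omega)
    have := hrows _ hmem
    simp only [List.cons_append, List.nil_append, List.length_cons, List.length_append,
      List.length_take, List.length_nil]
    omega

-- the cell of the padded table is A's bounds-checked lookup
theorem pv_cell (grid : List (List String)) (f : String) (n2 : Nat)
    (hrows : ∀ row ∈ grid, n2 ≤ row.length)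
    (a b : Nat) (ha : a < grid.length + 4) (hb : b < n2 + 4) :
    ((pvPadded grid f n2).getD a []).getD b ""
      = pvLookup grid f grid.length n2 ((a : Int) - 2) ((b : Int) - 2) := by
  rw [pv_padded_getD_row grid f n2 a ha]
  unfold pvLookup
  by_cases h1 : a < 2 ∨ grid.length + 2 ≤ a
  · rw [if_pos h1, pv_padRow_getD f n2 b hb, if_pos (by omega)]
  · rw [if_neg h1]
    have h1' : 2 ≤ a ∧ a < grid.length + 2 := by omega
    have h2 : ¬ ((a : Int) - 2 < 0 ∨ (grid.length : Int) ≤ (a : Int) - 2) := by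
      omega
    rw [if_neg h2]
    have hmem : grid.getD (a - 2) [] ∈ grid := pv_getD_mem _ _ _ (by omega)
    have hlen : n2 ≤ (grid.getD (a - 2) []).length := hrows _ hmem
    rw [pv_wrap_getD f _ n2 hlen b hb]
    have e1 : ((a : Int) - 2) = ((a - 2 : Nat) : Int) := by omega
    rw [e1, PySem.List.pyGetD_natCast]
    by_cases h3 : b < 2 ∨ n2 + 2 ≤ b
    · rw [if_pos h3, if_pos (by omega)]
    · rw [if_neg h3,
        if_neg (by omega),
        show ((b : Int) - 2) = ((b - 2 : Nat) : Int) by omega,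
        PySem.List.pyGetD_natCast]

-- ===== VERDICT (by name: the statement is the Claim_ definition above) =====
theorem windowed_box_spec : Claim_equal_windowed_box := by
  intro grid fill _ hpre
  obtain ⟨hne, hrows⟩ := hpre
  unfold Spec_windowed_box windowed_box windowed_box_alt
  have h0 : PySem.List.pyGetD grid 0 [] = grid.headD [] := by
    rw [PySem.List.pyGetD_zero]; cases grid <;> rfl
  have hrows' : ∀ row ∈ grid, (PySem.List.pyGetD grid 0 []).length ≤ row.length := by
    rw [h0]; exact hrows
  have ht1 : ((grid.length : Int) - (-2)).toNat = grid.length + 2 := by omega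
  have hr1 : PySem.List.pyRange (-2) (grid.length : Int) 1
      = (List.range (grid.length + 2)).map (fun (k : Nat) => (-2 : Int) + (k : Int)) := by
    apply List.ext_getElem
    · simp [PySem.List.length_pyRange_one]
      omega
    · intro k h1 h2
      simp [PySem.List.getElem_pyRange_one]
  have ht2 : (((PySem.List.pyGetD grid 0 []).length : Int) - (-2)).toNat
      = (PySem.List.pyGetD grid 0 []).length + 2 := by omega
  have hr2 : PySem.List.pyRange (-2) ((PySem.List.pyGetD grid 0 []).length : Int) 1
      = (List.range ((PySem.List.pyGetD grid 0 []).length + 2)).map (fun (k : Nat) => (-2 : Int) + (k : Int)) := by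
    apply List.ext_getElem
    · simp [PySem.List.length_pyRange_one]
      omega
    · intro k h1 h2
      simp [PySem.List.getElem_pyRange_one]
  have h3 : PySem.List.pyRange 0 3 1 = [0, 1, 2] := by decide
  simp only [hr1, hr2, h3, List.foldl_map]
  rw [pv_foldl_flatMap]
  have hR3 : List.range 3 = [0, 1, 2] := by rfl
  simp only [hR3, List.nil_append, List.foldl_cons, List.foldl_nil, List.cons_append,
    List.map_cons, List.map_nil, List.flatMap_def]
  congr 1
  apply List.map_congr_left
  intro i hi
  apply List.map_congr_left
  intro j hj
  have hi' : i < grid.length + 2 := List.mem_range.mp hi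
  have hj' : j < (PySem.List.pyGetD grid 0 []).length + 2 := List.mem_range.mp hj
  have hlen : ∀ w : Nat, w < 3 → j + 3 ≤ ((pvPadded grid fill (PySem.List.pyGetD grid 0 []).length).getD (i + w) []).length := by
    intro w hw
    rw [pv_padded_row_len grid fill _ (i + w) hrows' (by omega)]
    omega
  have hcell : ∀ a b : Nat, a < grid.length + 4 → b < (PySem.List.pyGetD grid 0 []).length + 4 →
      ((pvPadded grid fill (PySem.List.pyGetD grid 0 []).length).getD a []).getD b ""
        = pvLookup grid fill (grid.length : Int) ((PySem.List.pyGetD grid 0 []).length : Int) ((a : Int) - 2) ((b : Int) - 2) :=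
    fun a b ha hb => pv_cell grid fill _ hrows' a b ha hb
  rw [pv_take3_drop "" _ j (hlen 0 (by omega)), pv_take3_drop "" _ j (hlen 1 (by omega)),
    pv_take3_drop "" _ j (hlen 2 (by omega)),
    hcell (i + 0) j (by omega) (by omega), hcell (i + 0) (j + 1) (by omega) (by omega),
    hcell (i + 0) (j + 2) (by omega) (by omega),
    hcell (i + 1) j (by omega) (by omega), hcell (i + 1) (j + 1) (by omega) (by omega),
    hcell (i + 1) (j + 2) (by omega) (by omega),
    hcell (i + 2) j (by omega) (by omega), hcell (i + 2) (j + 1) (by omega) (by omega),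
    hcell (i + 2) (j + 2) (by omega) (by omega)]
  push_cast
  ring_nf
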